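-- pv_equiv track=rewrite | github.com/See-Its-Manish/Python | Deepak.py | func
-- ===== SOURCE A (Python) =====
-- def func(l):
-- 	pos6 = -1
-- 	pos9 = -1
-- 	for i in range(len(l)):
-- 		if(l[i] == 6 and pos6 == -1):
-- 			pos6 = i
-- 		if(l[i] == 9 and pos9 == -1):
-- 			pos9 = i
--
-- 	sum = 0
--
-- 	for i in range(len(l)):
-- 		if(i>=pos6 and i<=pos9):
-- 			continue
-- 		sum += l[i]
--
-- 	return sum
-- ===== SOURCE B (Python) =====
-- def func(l):
--     total = sum(l)
--     pos6 = l.index(6) if 6 in l else -1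
--     pos9 = l.index(9) if 9 in l else -1
--     lo = pos6 if pos6 >= 0 else 0
--     return total - sum(l[lo:pos9 + 1])
-- ===== Notes on version B (the rewrite author's own statement) =====
-- stated objective: simpler
-- what changed: B replaces A's two index loops (first-occurrence scan with -1 sentinels, then a skip-filter summing loop) by sum(l) minus the sum of the skipped slice l[lo:pos9+1], with pos6/pos9 found via guarded l.index.
import Mathlib
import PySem

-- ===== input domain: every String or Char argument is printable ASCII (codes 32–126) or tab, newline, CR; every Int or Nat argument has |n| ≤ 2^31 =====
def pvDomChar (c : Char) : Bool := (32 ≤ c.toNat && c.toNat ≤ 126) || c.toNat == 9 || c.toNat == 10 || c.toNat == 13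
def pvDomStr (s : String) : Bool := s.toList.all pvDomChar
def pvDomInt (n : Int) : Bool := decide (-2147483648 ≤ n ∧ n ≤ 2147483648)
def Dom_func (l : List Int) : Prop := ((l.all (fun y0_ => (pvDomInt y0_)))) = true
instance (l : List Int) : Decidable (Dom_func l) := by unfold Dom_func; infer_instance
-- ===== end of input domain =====

-- B replaces A's skip-filter second loop by one total sum minus the sum of the skipped slice
-- (simpler decomposition; first-index search via guarded l.index instead of an index loop).

-- ===== PORT A =====
-- A: one index loop recording first positions of 6 and 9 (sentinel -1), then a second
-- index loop summing every l[i] outside [pos6, pos9].  l[i] with i in range(len(l)) never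
-- raises, so pyGetD with default 0 is exact here.
def func (l : List Int) : Int :=
  let ps : Int × Int := (PySem.List.pyRange 0 (l.length : Int) 1).foldl
    (fun (p : Int × Int) i =>
      let p6 := if PySem.List.pyGetD l i 0 = 6 ∧ p.1 = -1 then i else p.1
      let p9 := if PySem.List.pyGetD l i 0 = 9 ∧ p.2 = -1 then i else p.2
      (p6, p9)) (-1, -1)
  (PySem.List.pyRange 0 (l.length : Int) 1).foldl
    (fun s i => if i ≥ ps.1 ∧ i ≤ ps.2 then s else s + PySem.List.pyGetD l i 0) 0

-- ===== PORT B =====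
-- B: total = sum(l); pos6/pos9 via guarded l.index (index? is some under the membership
-- guard, so the getD 0 default is unreached); answer = total - sum(l[lo:pos9+1]).
def func_alt (l : List Int) : Int :=
  let total := l.sum
  let pos6 : Int := if 6 ∈ l then ((PySem.List.index? l 6).getD 0 : Nat) else -1
  let pos9 : Int := if 9 ∈ l then ((PySem.List.index? l 9).getD 0 : Nat) else -1
  let lo : Int := if pos6 ≥ 0 then pos6 else 0
  total - (PySem.List.slice l (some lo) (some (pos9 + 1))).sum

-- ===== PRECONDITION & SPEC =====
def Spec_func (l : List Int) (out : Int) : Prop := out = func_alt l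
instance (l : List Int) (out : Int) : Decidable (Spec_func l out) := by unfold Spec_func; infer_instance

-- ===== CLAIM (what is proved, stated in full; the proofs are below) =====
def Claim_equal_func : Prop := ∀ (l : List Int), Dom_func l → Spec_func l (func l)

-- ===== LEMMAS AND PROOFS =====

-- first index of v in l as Python's sentinel int: index if present, -1 otherwise
def pvFirst (l : List Int) (v : Int) : Int :=
  match PySem.List.index? l v with
  | some k => (k : Int)
  | none => -1

theorem pvFirst_neg1_le (l : List Int) (v : Int) : -1 ≤ pvFirst l v := by
  unfold pvFirst
  cases h : PySem.List.index? l v <;> simp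

theorem pvGetD_append_lt (l : List Int) (x : Int) {i : Int} (h0 : 0 ≤ i)
    (h1 : i < (l.length : Int)) :
    PySem.List.pyGetD (l ++ [x]) i 0 = PySem.List.pyGetD l i 0 := by
  rw [PySem.List.pyGetD_eq_getElem _ _ h0 (by simp; omega),
      PySem.List.pyGetD_eq_getElem _ _ h0 h1]
  exact List.getElem_append_left (by omega)

theorem pvGetD_append_last (l : List Int) (x : Int) :
    PySem.List.pyGetD (l ++ [x]) (l.length : Int) 0 = x := by
  rw [PySem.List.pyGetD_eq_getElem _ _ (by positivity) (by simp)]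
  simp

theorem pvFirst_append (l : List Int) (x v : Int) :
    pvFirst (l ++ [x]) v =
      if v ∈ l then pvFirst l v
      else if x = v then (l.length : Int) else -1 := by
  by_cases hv : v ∈ l
  · simp only [hv, if_true, pvFirst, PySem.List.index?_append_of_mem [x] hv]
  · by_cases hx : x = v
    · subst hx
      simp only [hv, if_false, if_true, pvFirst,
        PySem.List.index?_append_singleton_self l x hv]
    · simp only [hv, hx, if_false, pvFirst]
      have hnone : PySem.List.index? (l ++ [x]) v = none := by
        rw [PySem.List.index?_eq_none_iff]
        simp only [List.mem_append, List.mem_singleton]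
        rintro (h | h)
        · exact hv h
        · exact hx h.symm
      rw [hnone]

theorem pvFirst_mem_iff (l : List Int) (v : Int) : v ∈ l ↔ pvFirst l v ≠ -1 := by
  unfold pvFirst
  rw [← PySem.List.index?_isSome_iff l v]
  cases h : PySem.List.index? l v <;> simp

-- A's first loop computes exactly (pvFirst l 6, pvFirst l 9)
theorem pvLoop1 (l : List Int) :
    (PySem.List.pyRange 0 (l.length : Int) 1).foldl
      (fun (p : Int × Int) i =>
        let p6 := if PySem.List.pyGetD l i 0 = 6 ∧ p.1 = -1 then i else p.1
        let p9 := if PySem.List.pyGetD l i 0 = 9 ∧ p.2 = -1 then i else p.2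
        (p6, p9)) (-1, -1) = (pvFirst l 6, pvFirst l 9) := by
  induction l using List.reverseRecOn with
  | nil => simp [PySem.List.pyRange_one_eq_nil, pvFirst, PySem.List.index?]
  | append_singleton l x ih =>
    have hlen : (((l ++ [x]).length : Int)) = (l.length : Int) + 1 := by simp
    rw [hlen, PySem.List.pyRange_one_succ_right (by positivity), List.foldl_append]
    have hc : List.foldl
        (fun (p : Int × Int) i =>
          let p6 := if PySem.List.pyGetD (l ++ [x]) i 0 = 6 ∧ p.1 = -1 then i else p.1
          let p9 := if PySem.List.pyGetD (l ++ [x]) i 0 = 9 ∧ p.2 = -1 then i else p.2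
          (p6, p9)) (-1, -1) (PySem.List.pyRange 0 (l.length : Int) 1) =
        (pvFirst l 6, pvFirst l 9) := by
      rw [PySem.List.foldl_congr_mem _ _
        (fun (p : Int × Int) i =>
          let p6 := if PySem.List.pyGetD l i 0 = 6 ∧ p.1 = -1 then i else p.1
          let p9 := if PySem.List.pyGetD l i 0 = 9 ∧ p.2 = -1 then i else p.2
          (p6, p9)) _
        (by
          intro acc i hi
          rw [PySem.List.mem_pyRange_one] at hi
          simp only [pvGetD_append_lt l x hi.1 hi.2])]
      exact ih
    rw [hc]
    have h6 := pvFirst_neg1_le l 6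
    have h9 := pvFirst_neg1_le l 9
    simp only [List.foldl_cons, List.foldl_nil, pvGetD_append_last l x]
    rw [pvFirst_append l x 6, pvFirst_append l x 9]
    have m6 := pvFirst_mem_iff l 6
    have m9 := pvFirst_mem_iff l 9
    by_cases h6m : (6 : Int) ∈ l <;> by_cases h9m : (9 : Int) ∈ l <;>
      by_cases hx6 : x = 6 <;> by_cases hx9 : x = 9 <;>
      simp_all

-- A's second loop, for bounds lo and hi ≥ -1, equals sum(l) - sum(l[max lo 0 : hi+1])
theorem pvLoop2 (l : List Int) (lo hi : Int) (hhi : -1 ≤ hi) :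
    (PySem.List.pyRange 0 (l.length : Int) 1).foldl
      (fun s i => if i ≥ lo ∧ i ≤ hi then s else s + PySem.List.pyGetD l i 0) 0 =
    l.sum - (PySem.List.slice l (some (max lo 0)) (some (hi + 1))).sum := by
  have hb : (0 : Int) ≤ hi + 1 := by omega
  have ha0 : (0 : Int) ≤ max lo 0 := le_max_right lo 0
  induction l using List.reverseRecOn with
  | nil => simp [PySem.List.pyRange_one_eq_nil, PySem.List.slice_toNat _ ha0 hb]
  | append_singleton l x ih =>
    have hlen : (((l ++ [x]).length : Int)) = (l.length : Int) + 1 := by simp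
    rw [hlen, PySem.List.pyRange_one_succ_right (by positivity), List.foldl_append]
    have hc : List.foldl
        (fun s i => if i ≥ lo ∧ i ≤ hi then s else s + PySem.List.pyGetD (l ++ [x]) i 0) 0
        (PySem.List.pyRange 0 (l.length : Int) 1) =
        l.sum - (PySem.List.slice l (some (max lo 0)) (some (hi + 1))).sum := by
      rw [PySem.List.foldl_congr_mem _ _
        (fun s i => if i ≥ lo ∧ i ≤ hi then s else s + PySem.List.pyGetD l i 0) _
        (by
          intro acc i hi'
          rw [PySem.List.mem_pyRange_one] at hi'
          simp only [pvGetD_append_lt l x hi'.1 hi'.2])]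
      exact ih
    rw [hc]
    simp only [List.foldl_cons, List.foldl_nil, pvGetD_append_last l x]
    set a : Int := max lo 0 with ha
    rw [PySem.List.slice_toNat _ ha0 hb, PySem.List.slice_toNat _ ha0 hb]
    by_cases han : a.toNat ≤ l.length
    · rw [List.drop_append_of_le_length han]
      by_cases ht : (hi + 1).toNat - a.toNat ≤ l.length - a.toNat
      · rw [List.take_append_of_le_length (by simpa using ht)]
        have hno : ¬ ((l.length : Int) ≥ lo ∧ (l.length : Int) ≤ hi) := by
          simp only [not_and, not_le]
          intro hlo
          omega
        rw [if_neg hno]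
        simp only [List.sum_append, List.sum_cons, List.sum_nil]
        ring
      · have hcov : (l.length : Int) ≥ lo ∧ (l.length : Int) ≤ hi := by
          constructor <;> omega
        rw [if_pos hcov]
        rw [List.take_of_length_le (by simp; omega),
            List.take_of_length_le (by simp; omega)]
        simp only [List.sum_append, List.sum_cons, List.sum_nil]
        ring
    · have hd1 : List.drop a.toNat (l ++ [x]) = [] := by
        apply List.drop_eq_nil_of_le
        simp; omega
      have hd2 : List.drop a.toNat l = [] := by
        apply List.drop_eq_nil_of_le; omega
      rw [hd1, hd2]
      have hno : ¬ ((l.length : Int) ≥ lo ∧ (l.length : Int) ≤ hi) := by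
        simp only [not_and, not_le]
        intro hlo
        omega
      rw [if_neg hno]
      simp only [List.take_nil, List.sum_nil, List.sum_append, List.sum_cons, List.sum_nil]
      ring

theorem func_alt_pos (l : List Int) (v : Int) :
    (if v ∈ l then (((PySem.List.index? l v).getD 0 : Nat) : Int) else -1) = pvFirst l v := by
  unfold pvFirst
  by_cases hv : v ∈ l
  · have hs := (PySem.List.index?_isSome_iff l v).mpr hv
    cases h : PySem.List.index? l v with
    | none => rw [h] at hs; simp at hs
    | some k => simp [hv]
  · simp only [hv, if_false]
    rw [(PySem.List.index?_eq_none_iff l v).mpr hv]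

-- ===== VERDICT (by name: the statement is the Claim_ definition above) =====
theorem func_spec : Claim_equal_func := by
  intro l _
  unfold Spec_func func func_alt
  simp only [pvLoop1, func_alt_pos]
  rw [pvLoop2 l (pvFirst l 6) (pvFirst l 9) (pvFirst_neg1_le l 9)]
  have h6 := pvFirst_neg1_le l 6
  have hlo : (if pvFirst l 6 ≥ 0 then pvFirst l 6 else 0) = max (pvFirst l 6) 0 := by
    split_ifs with h <;> omega
  rw [hlo]
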